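-- pv_equiv track=rewrite | github.com/DisyInformationssysteme/git-to-jira-links | correlate_files_per_issue.py | aggregate_files_per_issue
-- ===== SOURCE A (Python) =====
-- def aggregate_files_per_issue(changes):
--     """Associate the files with their issues.
--
--     >>> i = list(aggregate_files_per_issue([('FOO-1111', '2018-03-12', ('A', 'B'), (1, 15)), ('FOO-1111', '2018-03-10', ('A', 'C'), (2, 5)), ('FOO-1112', '2018-03-11', ('A', 'D'), (2, 8))]).items())
--     >>> i.sort()
--     >>> i
--     [('2018-03-11:FOO-1112', ('A', 'D')), ('2018-03-12:FOO-1111', ('A', 'B', 'C'))]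
--     """
--     issuedatelatest = {}
--     mapped = {}
--     for i in changes:
--         issue = i[0]
--         date = i[1]
--         files = i[2]
--         sizes = i[3]
--         if issue not in issuedatelatest or issuedatelatest[issue] < date:
--             issuedatelatest[issue] = date
--         if issue not in mapped:
--             mapped[issue] = set()
--         for f in files:
--             mapped[issue].add(f)
--     for key, value in mapped.items():
--         value = list(value)
--         value.sort()
--         mapped[key] = tuple(value)
--     # add the latest known edit date of the issue
--     withdate = {}
--     for key, value in mapped.items():
--         date = issuedatelatest[key]
--         withdate[date + ":" + key] = value
--     return withdate
-- ===== SOURCE B (Python) =====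
-- def aggregate_files_per_issue(changes):
--     """Associate the files with their issues.
--
--     Per distinct issue (in first-occurrence order), scan its records once:
--     latest date = lexicographic max of the date strings, files = sorted set
--     union of the records' file lists.
--     """
--     result = {}
--     for issue in dict.fromkeys(c[0] for c in changes):
--         group = [c for c in changes if c[0] == issue]
--         date = max(c[1] for c in group)
--         files = tuple(sorted({f for c in group for f in c[2]}))
--         result[date + ":" + issue] = files
--     return result
-- ===== Notes on version B (the rewrite author's own statement) =====
-- stated objective: idiomatic
-- what changed: Instead of threading two mutable dicts through one pass and then rewriting/re-keying them in two further dict passes, B first dedups the issue ids (dict.fromkeys) and then, per distinct issue, scans the change list once for that issue's group, taking max() of its date strings and the sorted set union of its files, inserting straight into the result dict.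
import Mathlib
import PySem

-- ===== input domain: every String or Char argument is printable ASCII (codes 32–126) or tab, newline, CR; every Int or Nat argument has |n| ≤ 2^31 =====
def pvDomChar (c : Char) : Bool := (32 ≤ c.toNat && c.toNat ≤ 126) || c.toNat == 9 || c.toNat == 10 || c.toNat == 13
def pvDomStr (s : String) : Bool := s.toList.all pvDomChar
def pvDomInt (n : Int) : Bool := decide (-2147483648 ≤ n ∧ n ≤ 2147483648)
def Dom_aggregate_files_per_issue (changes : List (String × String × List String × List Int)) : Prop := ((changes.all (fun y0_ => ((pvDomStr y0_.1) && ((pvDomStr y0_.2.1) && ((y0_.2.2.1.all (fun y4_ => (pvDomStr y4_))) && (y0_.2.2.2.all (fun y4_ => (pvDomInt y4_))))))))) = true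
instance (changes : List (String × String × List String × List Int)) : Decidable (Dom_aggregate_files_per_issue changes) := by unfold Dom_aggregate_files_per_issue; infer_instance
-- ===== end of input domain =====

-- B replaces A's three dict passes (two dicts filled incrementally, an in-place rewrite
-- pass, a re-keying pass) by a dedup of the issue ids followed by one per-issue scan
-- of the change list; same return value, stated as idiomatic (not faster).

-- ===== PORT A =====
-- 'if issue not in issuedatelatest or issuedatelatest[issue] < date: issuedatelatest[issue] = date'
def pvStepLatest (d : PySem.Dict String String) (i : String × String × List String × List Int) : PySem.Dict String String :=
  if d.contains i.1 = false ∨ d.getD i.1 "" < i.2.1 then d.insert i.1 i.2.1 else d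

-- 'if issue not in mapped: mapped[issue] = set()' then 'for f in files: mapped[issue].add(f)'
def pvStepMapped (m : PySem.Dict String (PySem.Set String)) (i : String × String × List String × List Int) : PySem.Dict String (PySem.Set String) :=
  i.2.2.1.foldl (fun m' f => m'.modify i.1 [] (fun s => PySem.Set.add s f)) (m.setdefault i.1 PySem.Set.empty)

def aggregate_files_per_issue (changes : List (String × String × List String × List Int)) : List (String × List String) :=
  let issuedatelatest := changes.foldl pvStepLatest PySem.Dict.empty
  let mapped := changes.foldl pvStepMapped PySem.Dict.empty
  -- 'for key, value in mapped.items(): mapped[key] = tuple(sorted(list(value)))'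
  -- (Python rewrites the same dict in place; the value type changes, so a fresh dict here)
  let mapped2 := mapped.items.foldl (fun (d : PySem.Dict String (List String)) kv => d.insert kv.1 (PySem.List.sorted kv.2 (fun x => x) false)) PySem.Dict.empty
  -- 'withdate[date + ":" + key] = value' with 'date = issuedatelatest[key]' (key always present, so getD is exact)
  let withdate := mapped2.items.foldl (fun (d : PySem.Dict String (List String)) kv => d.insert (issuedatelatest.getD kv.1 "" ++ ":" ++ kv.1) kv.2) PySem.Dict.empty
  withdate.items

-- ===== PORT B =====
def aggregate_files_per_issue_alt (changes : List (String × String × List String × List Int)) : List (String × List String) :=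
  let issues := PySem.List.dedup (changes.map (fun c => c.1))
  let result := issues.foldl (fun (d : PySem.Dict String (List String)) issue =>
    let group := changes.filter (fun c => c.1 == issue)
    -- 'max(c[1] for c in group)': group is nonempty for every deduped issue, so max? is some
    let date := (PySem.List.max? (group.map (fun c => c.2.1)) (fun x => x)).getD ""
    let files := PySem.List.sorted (PySem.Set.ofList (group.flatMap (fun c => c.2.2.1))) (fun x => x) false
    d.insert (date ++ ":" ++ issue) files) PySem.Dict.empty
  result.items

-- ===== PRECONDITION & SPEC =====
def Spec_aggregate_files_per_issue (changes : List (String × String × List String × List Int)) (out : List (String × List String)) : Prop := out = aggregate_files_per_issue_alt changes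
instance (changes : List (String × String × List String × List Int)) (out : List (String × List String)) : Decidable (Spec_aggregate_files_per_issue changes out) := by unfold Spec_aggregate_files_per_issue; infer_instance

-- ===== CLAIM (what is proved, stated in full; the proofs are below) =====
def Claim_equal_aggregate_files_per_issue : Prop := ∀ (changes : List (String × String × List String × List Int)), Dom_aggregate_files_per_issue changes → Spec_aggregate_files_per_issue changes (aggregate_files_per_issue changes)

-- ===== LEMMAS AND PROOFS =====

-- one latest-date step, seen through get?
lemma latest_step_get? (d : PySem.Dict String String) (c : String × String × List String × List Int) (k : String) :
    (pvStepLatest d c).get? k =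
      if c.1 = k then some (match d.get? k with | none => c.2.1 | some cur => if cur < c.2.1 then c.2.1 else cur)
      else d.get? k := by
  unfold pvStepLatest
  by_cases hk : c.1 = k
  · subst hk
    rcases h : d.get? c.1 with _ | cur
    · have hc : d.contains c.1 = false := by
        rw [PySem.Dict.contains_eq_isSome_get?, h]; rfl
      simp [hc, PySem.Dict.get?_insert_self]
    · have hc : d.contains c.1 = true := by
        rw [PySem.Dict.contains_eq_isSome_get?, h]; rfl
      have hg : d.getD c.1 "" = cur := PySem.Dict.getD_of_get?_eq_some d "" h
      by_cases hlt : cur < c.2.1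
      · simp [hc, hg, hlt, PySem.Dict.get?_insert_self]
      · simp [hc, hg, hlt, h]
  · split
    · exact PySem.Dict.get?_insert_of_ne d c.2.1 (fun h => hk h.symm)
    · rfl

-- the latest-date dict after A's first loop: lookup = running max over the matching records' dates
lemma latest_get? (cs : List (String × String × List String × List Int)) (d : PySem.Dict String String) (k : String) :
    (cs.foldl pvStepLatest d).get? k =
      ((cs.filter (fun c => c.1 == k)).map (fun c => c.2.1)).foldl
        (fun o dt => some (match o with | none => dt | some c => if c < dt then dt else c)) (d.get? k) := by
  induction cs generalizing d with
  | nil => rfl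
  | cons c cs ih =>
    simp only [List.foldl_cons, List.filter_cons]
    by_cases hk : c.1 = k
    · simp only [hk, beq_self_eq_true, if_pos, List.map_cons, List.foldl_cons]
      rw [ih, latest_step_get?]
      simp [hk]
    · have : (c.1 == k) = false := beq_eq_false_iff_ne.mpr hk
      simp only [this, Bool.false_eq_true, ih]
      rw [latest_step_get?]
      simp [hk]

-- A's 'keep the larger, keep first on ties' update is the running max
lemma foldl_upd_some (t : List String) (x : String) :
    t.foldl (fun o dt => some (match o with | none => dt | some c => if c < dt then dt else c)) (some x)
      = some (t.foldl max x) := by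
  induction t generalizing x with
  | nil => rfl
  | cons a t ih =>
    simp only [List.foldl_cons, ih]
    congr 1
    rcases lt_trichotomy x a with h | h | h
    · simp [h, max_eq_right h.le]
    · simp [h]
    · simp [not_lt.mpr h.le, max_eq_left h.le]

lemma setdefault_getD (m : PySem.Dict String (PySem.Set String)) (key k : String) :
    (m.setdefault key PySem.Set.empty).getD k [] = m.getD k [] := by
  by_cases hc : m.contains key = true
  · rw [PySem.Dict.setdefault_of_contains m _ hc]
  · rw [PySem.Dict.setdefault_of_not_contains m _ (by simpa using hc), PySem.Dict.getD_insert]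
    split
    · next h => subst h; rw [PySem.Dict.getD_of_not_contains m [] (by simpa using hc)]; rfl
    · rfl

-- A's inner 'for f in files: mapped[issue].add(f)' loop
lemma inner_getD (fs : List String) (m : PySem.Dict String (PySem.Set String)) (key k : String) :
    (fs.foldl (fun m' f => m'.modify key [] (fun s => PySem.Set.add s f)) m).getD k [] =
      if k = key then PySem.Set.update (m.getD key []) fs else m.getD k [] := by
  induction fs generalizing m with
  | nil =>
    simp only [List.foldl_nil]
    split
    · next h => subst h; rfl
    · rfl
  | cons f fs ih =>
    simp only [List.foldl_cons, ih, PySem.Dict.getD_modify]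
    by_cases hk : k = key
    · simp [hk, PySem.Set.update]
    · simp [hk]

-- the files dict after A's first loop: lookup = set union over the matching records' files
lemma mapped_getD (cs : List (String × String × List String × List Int)) (m : PySem.Dict String (PySem.Set String)) (k : String) :
    (cs.foldl pvStepMapped m).getD k [] =
      PySem.Set.update (m.getD k []) ((cs.filter (fun c => c.1 == k)).flatMap (fun c => c.2.2.1)) := by
  induction cs generalizing m with
  | nil => simp [PySem.Set.update]
  | cons c cs ih =>
    simp only [List.foldl_cons, List.filter_cons, ih]
    by_cases hk : c.1 = k
    · subst hk
      simp only [beq_self_eq_true, if_pos, List.flatMap_cons]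
      unfold pvStepMapped
      rw [inner_getD, if_pos rfl, setdefault_getD]
      simp [PySem.Set.update, List.foldl_append]
    · have hb : (c.1 == k) = false := beq_eq_false_iff_ne.mpr hk
      simp only [hb, Bool.false_eq_true]
      unfold pvStepMapped
      rw [inner_getD, if_neg (fun h => hk h.symm), setdefault_getD]
      simp

lemma set_add_of_mem {s : PySem.Set String} {x : String} (h : x ∈ s) : PySem.Set.add s x = s := by
  simp [PySem.Set.add, PySem.Set.contains, h]

lemma mapped_keys_step (m : PySem.Dict String (PySem.Set String)) (c : String × String × List String × List Int) :
    (pvStepMapped m c).keys = PySem.Set.add m.keys c.1 := by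
  unfold pvStepMapped
  rw [PySem.Dict.keys_foldl_modify_key]
  have hsd : (m.setdefault c.1 PySem.Set.empty).keys = PySem.Set.add m.keys c.1 := by
    by_cases hc : m.contains c.1 = true
    · rw [PySem.Dict.setdefault_of_contains m _ hc]
      have : c.1 ∈ m.keys := (PySem.Dict.contains_iff_mem_keys m c.1).mp hc
      rw [set_add_of_mem this]
    · rw [PySem.Dict.setdefault_of_not_contains m _ (by simpa using hc),
         PySem.Dict.keys_insert_of_not_contains m _ (by simpa using hc)]
      have : ¬ c.1 ∈ m.keys := fun h => hc ((PySem.Dict.contains_iff_mem_keys m c.1).mpr h)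
      simp [PySem.Set.add, PySem.Set.contains, this]
  rw [hsd]
  have hmem : c.1 ∈ PySem.Set.add m.keys c.1 := by
    simp [PySem.Set.add, PySem.Set.contains]
    split <;> simp_all
  generalize PySem.Set.add m.keys c.1 = s at *
  induction c.2.2.1 with
  | nil => rfl
  | cons f fs ih => simp [PySem.Set.update, set_add_of_mem hmem] at ih ⊢; simpa [set_add_of_mem hmem] using ih

-- the files dict's keys: issue ids, first occurrences, in order
lemma mapped_keys (cs : List (String × String × List String × List Int)) (m : PySem.Dict String (PySem.Set String)) :
    (cs.foldl pvStepMapped m).keys = PySem.Set.update m.keys (cs.map (fun c => c.1)) := by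
  induction cs generalizing m with
  | nil => rfl
  | cons c cs ih => simp only [List.foldl_cons, List.map_cons, ih, mapped_keys_step, PySem.Set.update, List.foldl_cons]

-- ===== VERDICT (by name: the statement is the Claim_ definition above) =====
theorem aggregate_files_per_issue_spec : Claim_equal_aggregate_files_per_issue := by
  intro changes _
  unfold Spec_aggregate_files_per_issue aggregate_files_per_issue aggregate_files_per_issue_alt
  dsimp only
  set latest := changes.foldl pvStepLatest PySem.Dict.empty with hlatest
  set mapped := changes.foldl pvStepMapped PySem.Dict.empty with hmapped
  have hkeys : mapped.keys = PySem.List.dedup (changes.map (fun c => c.1)) := by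
    rw [hmapped, mapped_keys, PySem.Dict.keys_empty, PySem.List.dedup_eq_ofList,
        PySem.Set.ofList_eq_foldl]
    rfl
  have hnd : mapped.keys.Nodup := by
    rw [hkeys, PySem.List.dedup_eq_ofList]; exact PySem.Set.nodup_ofList _
  have hitems2 : (mapped.items.foldl (fun (d : PySem.Dict String (List String)) kv => d.insert kv.1 (PySem.List.sorted kv.2 (fun x => x) false)) PySem.Dict.empty).items
      = mapped.items.map (fun kv => (kv.1, PySem.List.sorted kv.2 (fun x => x) false)) := by
    have := PySem.Dict.items_foldl_insert_fresh mapped.items (fun kv => kv.1)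
      (fun kv => PySem.List.sorted kv.2 (fun x => x) false) PySem.Dict.empty
      (fun a _ => PySem.Dict.contains_empty a.1) (by simpa [PySem.Dict.keys] using hnd)
    simpa using this
  rw [hitems2, PySem.Dict.items_eq_map_keys mapped hnd [], hkeys]
  simp only [List.map_map, List.foldl_map]
  congr 1
  apply PySem.List.foldl_congr_mem
  intro acc is hmem
  have hex : is ∈ changes.map (fun c => c.1) := (PySem.List.mem_dedup _ _).mp hmem
  -- the group of `is` is nonempty, so its date list is some x :: t
  obtain ⟨x, t, hgrp⟩ : ∃ x t, ((changes.filter (fun c => c.1 == is)).map (fun c => c.2.1)) = x :: t := by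
    obtain ⟨c, hc, hc1⟩ := List.mem_map.mp hex
    have : c ∈ changes.filter (fun c => c.1 == is) :=
      List.mem_filter.mpr ⟨hc, by simp [hc1]⟩
    rcases h : (changes.filter (fun c => c.1 == is)).map (fun c => c.2.1) with _ | ⟨x, t⟩
    · exfalso
      have := List.mem_map_of_mem (f := fun c => c.2.1) this
      rw [h] at this; exact absurd this (List.not_mem_nil)
    · exact ⟨x, t, h⟩
  have hdate : latest.getD is "" = (PySem.List.max? ((changes.filter (fun c => c.1 == is)).map (fun c => c.2.1)) (fun x => x)).getD "" := by
    rw [PySem.Dict.getD_eq_get?_getD, hlatest, latest_get?, PySem.Dict.get?_empty, hgrp,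
        PySem.List.max?_id_cons]
    simp only [List.foldl_cons]
    rw [foldl_upd_some]
  have hfiles : mapped.getD is [] = PySem.Set.ofList ((changes.filter (fun c => c.1 == is)).flatMap (fun c => c.2.2.1)) := by
    rw [hmapped, mapped_getD, PySem.Dict.getD_empty, PySem.Set.ofList_eq_foldl]
    rfl
  simp only [Function.comp_apply]
  rw [hdate, hfiles]
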